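-- pv_equiv track=rewrite | github.com/worldwidetorrent/5minPATH | scripts/analyze_clean_shadow_condition_panel.py | sort_dimension_keys
-- ===== SOURCE A (Python) =====
-- from typing import Any, Callable
--
-- def sort_dimension_keys(values: dict[str, Any], dimension: str) -> list[str]:
--     if dimension == "hour_of_day":
--         return sorted(values, key=lambda key: int(key))
--     preferred = {
--         "calibration_bucket": ["far_down", "lean_down", "near_mid", "lean_up", "far_up", "missing"],
--         "skew_presence": ["absent", "present"],
--         "fair_value_delta_bucket": ["lt_2c", "2c_to_5c", "5c_to_10c", "gte_10c", "missing"],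
--     }.get(dimension)
--     if preferred is None:
--         return sorted(values)
--     return [key for key in preferred if key in values] + sorted(
--         key for key in values if key not in preferred
--     )
-- ===== SOURCE B (Python) =====
-- from typing import Any
--
-- _PREFERRED = {
--     "calibration_bucket": ["far_down", "lean_down", "near_mid", "lean_up", "far_up", "missing"],
--     "skew_presence": ["absent", "present"],
--     "fair_value_delta_bucket": ["lt_2c", "2c_to_5c", "5c_to_10c", "gte_10c", "missing"],
-- }
--
--
-- def _arrange(pref: list[str], keys: list[str]) -> list[str]:
--     # Recurse over the preferred order, emitting each preferred key that is
--     # present and dropping it from the working list; whatever keys survive the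
--     # whole recursion are exactly the non-preferred ones, sorted at the base.
--     if not pref:
--         return sorted(keys)
--     p = pref[0]
--     rest = _arrange(pref[1:], [k for k in keys if k != p])
--     return [p] + rest if p in keys else rest
--
--
-- def sort_dimension_keys(values: dict[str, Any], dimension: str) -> list[str]:
--     if dimension == "hour_of_day":
--         return sorted(values, key=lambda key: int(key))
--     preferred = _PREFERRED.get(dimension)
--     if preferred is None:
--         return sorted(values)
--     return _arrange(preferred, list(values))
-- ===== Notes on version B (the rewrite author's own statement) =====
-- stated objective: alternative
-- what changed: The preferred-dimension branch's two-pass 'filter preferred present, then sort and append the remainder' is replaced by a single recursion over the preferred order that consumes matched keys from the working list and sorts only the untouched survivors at the base case.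
import Mathlib
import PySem

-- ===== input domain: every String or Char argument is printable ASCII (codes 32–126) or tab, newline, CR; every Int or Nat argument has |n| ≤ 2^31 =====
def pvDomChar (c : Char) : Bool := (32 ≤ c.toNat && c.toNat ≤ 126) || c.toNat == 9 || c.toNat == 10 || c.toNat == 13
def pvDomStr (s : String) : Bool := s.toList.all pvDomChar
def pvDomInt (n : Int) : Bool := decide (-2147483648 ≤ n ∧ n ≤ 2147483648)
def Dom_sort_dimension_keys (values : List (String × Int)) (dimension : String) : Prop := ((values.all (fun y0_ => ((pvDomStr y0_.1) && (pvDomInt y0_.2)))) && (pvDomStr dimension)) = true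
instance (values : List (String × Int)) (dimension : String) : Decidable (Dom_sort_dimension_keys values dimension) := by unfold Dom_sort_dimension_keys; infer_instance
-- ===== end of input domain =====

-- B replaces A's two-pass 'filter preferred, then sort-and-append the rest' by one recursion
-- over the preferred order that consumes matched keys; equivalence of RETURN values is proved.

-- ===== PORT A =====
-- iteration over the dict 'values' iterates its keys: first occurrences, in insertion order
def pvKeys (values : List (String × Int)) : List String :=
  PySem.List.dedup (values.map Prod.fst)

-- the dict-literal '.get(dimension)' lookup, ported as the ordered chain of its three keys
def pvPreferred (dimension : String) : Option (List String) :=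
  if dimension = "calibration_bucket" then
    some ["far_down", "lean_down", "near_mid", "lean_up", "far_up", "missing"]
  else if dimension = "skew_presence" then
    some ["absent", "present"]
  else if dimension = "fair_value_delta_bucket" then
    some ["lt_2c", "2c_to_5c", "5c_to_10c", "gte_10c", "missing"]
  else none

def sort_dimension_keys (values : List (String × Int)) (dimension : String) : List String :=
  let keys := pvKeys values
  if dimension = "hour_of_day" then
    -- int(key): exact under Pre_ (every key parses); Python raises ValueError otherwise
    PySem.List.sorted keys (fun key => (PySem.Int.ofStr? key).getD 0) false
  else
    match pvPreferred dimension with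
    | none => PySem.List.sorted keys (fun k => k) false
    | some preferred =>
        preferred.filter (fun key => keys.contains key) ++
          PySem.List.sorted (keys.filter (fun key => !preferred.contains key)) (fun k => k) false

-- ===== PORT B =====
def pvArrange (pref : List String) (keys : List String) : List String :=
  match pref with
  | [] => PySem.List.sorted keys (fun k => k) false
  | p :: ps =>
      let rest := pvArrange ps (keys.filter (fun k => k ≠ p))
      if keys.contains p then p :: rest else rest

def sort_dimension_keys_alt (values : List (String × Int)) (dimension : String) : List String :=
  let keys := pvKeys values
  if dimension = "hour_of_day" then
    PySem.List.sorted keys (fun key => (PySem.Int.ofStr? key).getD 0) false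
  else
    match pvPreferred dimension with
    | none => PySem.List.sorted keys (fun k => k) false
    | some preferred => pvArrange preferred keys

-- ===== PRECONDITION & SPEC =====
-- Pre_ excludes only inputs where A raises: for dimension "hour_of_day", int(key) raises
-- ValueError on any dict key that is not an int literal (B raises there too).
def Pre_sort_dimension_keys (values : List (String × Int)) (dimension : String) : Prop :=
  dimension = "hour_of_day" → ∀ p ∈ values, (PySem.Int.ofStr? p.1).isSome

instance (values : List (String × Int)) (dimension : String) : Decidable (Pre_sort_dimension_keys values dimension) := by
  unfold Pre_sort_dimension_keys; infer_instance

def pvWitness_sort_dimension_keys : (List (String × Int)) × String :=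
  ([("present", 1), ("zz", 2), ("absent", 3)], "skew_presence")

def Spec_sort_dimension_keys (values : List (String × Int)) (dimension : String) (out : List String) : Prop := out = sort_dimension_keys_alt values dimension
instance (values : List (String × Int)) (dimension : String) (out : List String) : Decidable (Spec_sort_dimension_keys values dimension out) := by unfold Spec_sort_dimension_keys; infer_instance

-- ===== CLAIM (what is proved, stated in full; the proofs are below) =====
def Claim_equal_sort_dimension_keys : Prop := ∀ (values : List (String × Int)) (dimension : String), Dom_sort_dimension_keys values dimension → Pre_sort_dimension_keys values dimension → Spec_sort_dimension_keys values dimension (sort_dimension_keys values dimension)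

-- ===== LEMMAS AND PROOFS =====

theorem pvArrange_eq (pref : List String) (keys : List String) (hnd : pref.Nodup) :
    pvArrange pref keys =
      pref.filter (fun key => keys.contains key) ++
        PySem.List.sorted (keys.filter (fun key => !pref.contains key)) (fun k => k) false := by
  induction pref generalizing keys with
  | nil => simp [pvArrange]
  | cons p ps ih =>
    rcases List.nodup_cons.mp hnd with ⟨hp, hps⟩
    have h1 : ps.filter (fun q => (keys.filter (fun k => k ≠ p)).contains q)
        = ps.filter (fun q => keys.contains q) := by
      apply List.filter_congr
      intro q hq
      have hqp : q ≠ p := fun h => hp (h ▸ hq)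
      simp [hqp]
    have h2 : (keys.filter (fun k => k ≠ p)).filter (fun k => !ps.contains k)
        = keys.filter (fun k => !(p :: ps).contains k) := by
      rw [List.filter_filter]
      apply List.filter_congr
      intro k _
      by_cases hk : k = p <;> simp [hk]
    rw [pvArrange, ih _ hps, h1, h2, List.filter_cons]
    by_cases hpk : p ∈ keys <;> simp [hpk]

-- ===== VERDICT (by name: the statement is the Claim_ definition above) =====
theorem sort_dimension_keys_spec : Claim_equal_sort_dimension_keys := by
  intro values dimension _ _
  unfold Spec_sort_dimension_keys sort_dimension_keys sort_dimension_keys_alt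
  by_cases hh : dimension = "hour_of_day"
  · simp [hh]
  · simp only [hh, if_false]
    rcases hpref : pvPreferred dimension with _ | pref
    · rfl
    · have hnd : pref.Nodup := by
        unfold pvPreferred at hpref
        split_ifs at hpref <;> simp_all <;> subst hpref <;> decide
      simp [pvArrange_eq pref (pvKeys values) hnd]
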